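-- pv_equiv track=rewrite | github.com/Fernando-Montes/ECAT | ViewerAnalysis2.py | make_param_labels
-- ===== SOURCE A (Python) =====
-- def make_param_labels(params):
--     labels = []
--     paramScale = []
--     for p in params:
--         if p['par'] == "XY":
--             labels.append(f"{p['elem']} X [mm]")
--             labels.append(f"{p['elem']} Y [mm]")
--             paramScale.append(1000)  # meters to mm
--             paramScale.append(1000)  # meters to mm
--         elif p['par'] == "X" or p['par'] == "Y":
--             labels.append(f"{p['elem']} {p['par']} [mm]")
--             paramScale.append(1000)  # meters to mm
--         elif p['par'] == "dB" or p['par'] == "B_SC":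
--             name = p['elem'][:3]
--             labels.append(f"{name} mistuned [%]")
--             paramScale.append(100)  # fraction to percentage
--         elif p['par'] == "mu_y":
--             labels.append(f"{p['elem']} Angle Y [mrad]")
--             paramScale.append(1000)  # rad to mrad
--         elif p['par'] == "mu" or p['par'] == "sigma":
--             labels.append(f"{p['elem']} Energy {p['par']} [%]")
--             paramScale.append(100)  # fraction to percentage
--         elif p['par'] == "Roll":
--             labels.append(f"{p['elem']} Roll [mrad]")
--             paramScale.append(1000)  # rad to mrad
--     return labels, paramScale
-- ===== SOURCE B (Python) =====
-- _TABLE = {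
--     "XY":    [(" X [mm]", 1000), (" Y [mm]", 1000)],
--     "X":     [(" X [mm]", 1000)],
--     "Y":     [(" Y [mm]", 1000)],
--     "dB":    [(" mistuned [%]", 100)],
--     "B_SC":  [(" mistuned [%]", 100)],
--     "mu_y":  [(" Angle Y [mrad]", 1000)],
--     "mu":    [(" Energy mu [%]", 100)],
--     "sigma": [(" Energy sigma [%]", 100)],
--     "Roll":  [(" Roll [mrad]", 1000)],
-- }
--
-- def make_param_labels(params):
--     labels, scales = [], []
--     for p in params:
--         par = p['par']
--         for suffix, scale in _TABLE.get(par, []):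
--             name = p['elem'][:3] if par in ("dB", "B_SC") else p['elem']
--             labels.append(name + suffix)
--             scales.append(scale)
--     return labels, scales
-- ===== Notes on version B (the rewrite author's own statement) =====
-- stated objective: simpler
-- what changed: Replaces the six-way elif chain by a single module-level table mapping each par value to its (suffix, scale) entries; one loop does a table lookup and appends label/scale pairs from the entries.
import Mathlib
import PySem

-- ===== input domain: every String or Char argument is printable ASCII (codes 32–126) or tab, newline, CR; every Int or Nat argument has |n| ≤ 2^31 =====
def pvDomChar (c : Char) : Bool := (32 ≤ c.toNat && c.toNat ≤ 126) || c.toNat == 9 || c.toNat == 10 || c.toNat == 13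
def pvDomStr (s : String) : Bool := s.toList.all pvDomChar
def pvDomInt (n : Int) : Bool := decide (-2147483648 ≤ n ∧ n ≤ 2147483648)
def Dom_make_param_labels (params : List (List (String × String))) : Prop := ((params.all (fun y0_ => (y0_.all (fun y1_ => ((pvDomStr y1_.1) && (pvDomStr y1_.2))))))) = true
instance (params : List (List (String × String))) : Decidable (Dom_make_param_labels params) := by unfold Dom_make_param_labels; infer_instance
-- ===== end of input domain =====

-- B replaces A's six-way elif chain by one lookup table from par values to (suffix, scale)
-- entries, traversed by a single uniform loop (objective: simpler).

-- ===== PORT A =====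
-- p['k'] on a Python dict given as an assoc list: last-wins construction, then lookup;
-- the default "" is only reached outside Pre_ (missing key = KeyError, excluded).
def make_param_labels (params : List (List (String × String))) : List String × List Int :=
  params.foldl (fun st p =>
    let d := PySem.Dict.ofList p
    let par := d.getD "par" ""
    if par == "XY" then
      (st.1 ++ [d.getD "elem" "" ++ " X [mm]", d.getD "elem" "" ++ " Y [mm]"], st.2 ++ [1000, 1000])
    else if par == "X" || par == "Y" then
      (st.1 ++ [d.getD "elem" "" ++ " " ++ par ++ " [mm]"], st.2 ++ [1000])
    else if par == "dB" || par == "B_SC" then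
      let name := PySem.Str.slice (d.getD "elem" "") none (some 3)
      (st.1 ++ [name ++ " mistuned [%]"], st.2 ++ [100])
    else if par == "mu_y" then
      (st.1 ++ [d.getD "elem" "" ++ " Angle Y [mrad]"], st.2 ++ [1000])
    else if par == "mu" || par == "sigma" then
      (st.1 ++ [d.getD "elem" "" ++ " Energy " ++ par ++ " [%]"], st.2 ++ [100])
    else if par == "Roll" then
      (st.1 ++ [d.getD "elem" "" ++ " Roll [mrad]"], st.2 ++ [1000])
    else st) ([], [])

-- ===== PORT B =====
def pvTable : PySem.Dict String (List (String × Int)) := PySem.Dict.ofList [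
  ("XY",    [(" X [mm]", 1000), (" Y [mm]", 1000)]),
  ("X",     [(" X [mm]", 1000)]),
  ("Y",     [(" Y [mm]", 1000)]),
  ("dB",    [(" mistuned [%]", 100)]),
  ("B_SC",  [(" mistuned [%]", 100)]),
  ("mu_y",  [(" Angle Y [mrad]", 1000)]),
  ("mu",    [(" Energy mu [%]", 100)]),
  ("sigma", [(" Energy sigma [%]", 100)]),
  ("Roll",  [(" Roll [mrad]", 1000)])]

def make_param_labels_alt (params : List (List (String × String))) : List String × List Int :=
  params.foldl (fun st p =>
    let d := PySem.Dict.ofList p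
    let par := d.getD "par" ""
    (pvTable.getD par []).foldl (fun st2 e =>
      let name := if par == "dB" || par == "B_SC"
                  then PySem.Str.slice (d.getD "elem" "") none (some 3)
                  else d.getD "elem" ""
      (st2.1 ++ [name ++ e.1], st2.2 ++ [e.2])) st) ([], [])

-- ===== PRECONDITION & SPEC =====
-- Pre_ excludes exactly the inputs where Python A raises KeyError: a dict without key 'par',
-- or without key 'elem' while its 'par' value selects one of the label-producing branches.
def Pre_make_param_labels (params : List (List (String × String))) : Prop :=
  ∀ p ∈ params, (PySem.Dict.ofList p).contains "par" = true ∧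
    ((PySem.Dict.ofList p).getD "par" "" ∈ ["XY", "X", "Y", "dB", "B_SC", "mu_y", "mu", "sigma", "Roll"] →
      (PySem.Dict.ofList p).contains "elem" = true)
instance (params : List (List (String × String))) : Decidable (Pre_make_param_labels params) := by
  unfold Pre_make_param_labels; infer_instance
def pvWitness_make_param_labels : (List (List (String × String))) :=
  [[("par", "mu"), ("elem", "Q1")]]
def Spec_make_param_labels (params : List (List (String × String))) (out : List String × List Int) : Prop := out = make_param_labels_alt params
instance (params : List (List (String × String))) (out : List String × List Int) : Decidable (Spec_make_param_labels params out) := by unfold Spec_make_param_labels; infer_instance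

-- ===== CLAIM (what is proved, stated in full; the proofs are below) =====
def Claim_equal_make_param_labels : Prop := ∀ (params : List (List (String × String))), Dom_make_param_labels params → Pre_make_param_labels params → Spec_make_param_labels params (make_param_labels params)

-- ===== LEMMAS AND PROOFS =====

-- Evaluation of B's lookup table at an arbitrary key.
theorem pvTable_getD (par : String) : PySem.Dict.getD pvTable par [] =
    if par = "XY" then [(" X [mm]", (1000:Int)), (" Y [mm]", 1000)]
    else if par = "X" then [(" X [mm]", 1000)]
    else if par = "Y" then [(" Y [mm]", 1000)]
    else if par = "dB" ∨ par = "B_SC" then [(" mistuned [%]", 100)]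
    else if par = "mu_y" then [(" Angle Y [mrad]", 1000)]
    else if par = "mu" then [(" Energy mu [%]", 100)]
    else if par = "sigma" then [(" Energy sigma [%]", 100)]
    else if par = "Roll" then [(" Roll [mrad]", 1000)]
    else [] := by
  simp only [pvTable, PySem.Dict.ofList, PySem.Dict.update, List.foldl,
    PySem.Dict.getD_insert, PySem.Dict.getD_empty]
  split_ifs <;> simp_all

-- The two folds have pointwise-equal step functions (for EVERY p, keys present or not),
-- so the equivalence is this step lemma plus a congruence of the folds.
set_option maxHeartbeats 1000000 in
theorem pv_step_eq (st : List String × List Int) (p : List (String × String)) :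
    (let d := PySem.Dict.ofList p
     let par := d.getD "par" ""
     if par == "XY" then
       (st.1 ++ [d.getD "elem" "" ++ " X [mm]", d.getD "elem" "" ++ " Y [mm]"], st.2 ++ [1000, 1000])
     else if par == "X" || par == "Y" then
       (st.1 ++ [d.getD "elem" "" ++ " " ++ par ++ " [mm]"], st.2 ++ [1000])
     else if par == "dB" || par == "B_SC" then
       let name := PySem.Str.slice (d.getD "elem" "") none (some 3)
       (st.1 ++ [name ++ " mistuned [%]"], st.2 ++ [100])
     else if par == "mu_y" then
       (st.1 ++ [d.getD "elem" "" ++ " Angle Y [mrad]"], st.2 ++ [1000])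
     else if par == "mu" || par == "sigma" then
       (st.1 ++ [d.getD "elem" "" ++ " Energy " ++ par ++ " [%]"], st.2 ++ [100])
     else if par == "Roll" then
       (st.1 ++ [d.getD "elem" "" ++ " Roll [mrad]"], st.2 ++ [1000])
     else st) =
    (let d := PySem.Dict.ofList p
     let par := d.getD "par" ""
     (pvTable.getD par []).foldl (fun st2 e =>
       let name := if par == "dB" || par == "B_SC"
                   then PySem.Str.slice (d.getD "elem" "") none (some 3)
                   else d.getD "elem" ""
       (st2.1 ++ [name ++ e.1], st2.2 ++ [e.2])) st) := by
  simp only []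
  rw [pvTable_getD]
  split_ifs <;> simp_all [String.append_assoc]

-- ===== VERDICT (by name: the statement is the Claim_ definition above) =====
theorem make_param_labels_spec : Claim_equal_make_param_labels := by
  intro params _ _
  unfold Spec_make_param_labels make_param_labels make_param_labels_alt
  exact List.foldl_ext _ _ ([], []) (fun st p _ => pv_step_eq st p)
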